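-- pv_equiv track=rewrite | github.com/ramneetsiingh/nxdown | server/utils.py | get_work_size
-- ===== SOURCE A (Python) =====
-- def get_work_size(f_size):
--     '''
--      return size of work using formula
--      file size range = base_f_size * ( 2**(i*3) , 2**((i+1)*3) ]
--      and corresponding work size = base_work_size * 2**i
--     '''
--     w_conf = {
--         'base_f_size' : 20,         # 2^20 (1MB) smallest file size
--         'base_w_size' : 19,         # 2^19 (512KB) smallest work size
--         'max_f_size_index' : 7      # 0 based index , size of file_size vs work_size table
--     }
--     max_index = w_conf.get('max_f_size_index')
--     bfs = pow(2, w_conf.get('base_f_size'))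
--     bws = pow(2, w_conf.get('base_w_size'))
--
--     if f_size <= bfs:
--         return -1
--
--     for i in range(max_index):
--         if f_size > bfs*pow(2,i*3) and f_size <= bfs*pow(2,(i+1)*3):
--             break
--
--     return bws*pow(2,i)
-- ===== SOURCE B (Python) =====
-- def get_work_size(f_size):
--     if f_size <= 2**20:
--         return -1
--     i = min(6, max(0, ((f_size - 1).bit_length() - 21) // 3))
--     return 2**19 << i
-- ===== Notes on version B (the rewrite author's own statement) =====
-- stated objective: simpler
-- what changed: Replaced the linear scan over the size thresholds (and the config dict) with a closed-form bucket index computed from bit_length of the size minus one, clamped to the table range.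
import Mathlib
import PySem

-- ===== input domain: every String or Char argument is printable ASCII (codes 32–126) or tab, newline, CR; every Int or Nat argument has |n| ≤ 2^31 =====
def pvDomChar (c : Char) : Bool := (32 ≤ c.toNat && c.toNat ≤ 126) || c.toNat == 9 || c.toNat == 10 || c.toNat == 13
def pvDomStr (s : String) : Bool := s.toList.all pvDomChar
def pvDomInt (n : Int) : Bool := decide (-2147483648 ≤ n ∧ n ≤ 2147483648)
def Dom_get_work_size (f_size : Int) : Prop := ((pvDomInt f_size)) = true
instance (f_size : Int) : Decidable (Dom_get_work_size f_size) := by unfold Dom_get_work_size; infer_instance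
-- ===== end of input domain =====

-- B replaces A's linear scan over 7 size thresholds with a closed-form bucket index from bit_length (simpler).

-- ===== PORT A =====
-- the for-loop with break: first i in the list satisfying the window test, else the last visited i
def gwsLoop (f_size bfs : Int) : List Int → Int → Int
  | [], i => i
  | j :: rest, _ =>
    if f_size > bfs * (2:Int) ^ (j.toNat * 3) ∧ f_size ≤ bfs * (2:Int) ^ ((j.toNat + 1) * 3) then j
    else gwsLoop f_size bfs rest j

def get_work_size (f_size : Int) : Int :=
  let w_conf : PySem.Dict String Int :=
    ((PySem.Dict.empty.insert "base_f_size" 20).insert "base_w_size" 19).insert "max_f_size_index" 7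
  let max_index : Int := (PySem.Dict.get? w_conf "max_f_size_index").getD 0   -- keys present: .getD 0 never fires
  let bfs : Int := (2:Int) ^ ((PySem.Dict.get? w_conf "base_f_size").getD 0).toNat
  let bws : Int := (2:Int) ^ ((PySem.Dict.get? w_conf "base_w_size").getD 0).toNat
  if f_size ≤ bfs then -1
  else bws * (2:Int) ^ (gwsLoop f_size bfs (PySem.List.pyRange 0 max_index 1) 0).toNat

-- ===== PORT B =====
def get_work_size_alt (f_size : Int) : Int :=
  if f_size ≤ (2:Int) ^ 20 then -1
  else
    let i : Int := min 6 (max 0 (PySem.Int.floordiv ((PySem.Int.bitLength (f_size - 1) : Int) - 21) 3))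
    (2:Int) ^ 19 * (2:Int) ^ i.toNat   -- 2**19 << i, i ≥ 0

-- ===== PRECONDITION & SPEC =====
def Spec_get_work_size (f_size : Int) (out : Int) : Prop := out = get_work_size_alt f_size
instance (f_size : Int) (out : Int) : Decidable (Spec_get_work_size f_size out) := by unfold Spec_get_work_size; infer_instance

-- ===== CLAIM (what is proved, stated in full; the proofs are below) =====
def Claim_equal_get_work_size : Prop := ∀ (f_size : Int), Dom_get_work_size f_size → Spec_get_work_size f_size (get_work_size f_size)


-- ===== LEMMAS AND PROOFS =====

theorem pow_pos_two (m : Nat) : (0:Int) < 2 ^ m := by positivity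

theorem bl_lb (n : Int) (k : Nat) (h : (2:Int) ^ k ≤ n) : k < PySem.Int.bitLength n := by
  have h1 := PySem.Int.lt_two_pow_bitLength n
  have hn : ((n.natAbs : Int)) = n := Int.natAbs_of_nonneg (le_trans (le_of_lt (pow_pos_two k)) h)
  have h2 : (2:Nat) ^ k ≤ n.natAbs := by
    have : (2:Int) ^ k ≤ (n.natAbs : Int) := by rw [hn]; exact h
    exact_mod_cast this
  exact (Nat.pow_lt_pow_iff_right (by norm_num)).mp (lt_of_le_of_lt h2 h1)

theorem bl_ub (n : Int) (k : Nat) (h0 : 0 < n) (h : n < (2:Int) ^ k) : PySem.Int.bitLength n ≤ k := by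
  have h1 := PySem.Int.two_pow_bitLength_le n (by omega)
  have h2 : n.natAbs < (2:Nat) ^ k := by
    have : ((n.natAbs : Int)) < (2:Int) ^ k := by rwa [Int.natAbs_of_nonneg (le_of_lt h0)]
    exact_mod_cast this
  have h3 : PySem.Int.bitLength n - 1 < k :=
    (Nat.pow_lt_pow_iff_right (by norm_num)).mp (lt_of_le_of_lt h1 h2)
  have h4 : 0 < PySem.Int.bitLength n := bl_lb n 0 (by simpa using h0)
  omega

-- in bucket k: B's raw index evaluates to k
theorem alt_bucket (f_size : Int) (k : Nat) (hlo : (2:Int) ^ (20 + 3 * k) < f_size)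
    (hhi : f_size ≤ (2:Int) ^ (23 + 3 * k)) :
    PySem.Int.floordiv ((PySem.Int.bitLength (f_size - 1) : Int) - 21) 3 = (k : Int) := by
  have hp1 := pow_pos_two (20 + 3 * k)
  have hp2 := pow_pos_two (23 + 3 * k)
  have hb1 : 20 + 3 * k < PySem.Int.bitLength (f_size - 1) := bl_lb _ _ (by omega)
  have hb2 : PySem.Int.bitLength (f_size - 1) ≤ 23 + 3 * k := bl_ub _ _ (by omega) (by omega)
  rw [PySem.Int.floordiv_eq_iff_of_pos (by norm_num)]
  constructor <;> omega

-- evaluate the closed configuration parts of the two ports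
theorem gws_eval (f_size : Int) : get_work_size f_size =
    if f_size ≤ 1048576 then -1
    else 524288 * (2:Int) ^ (gwsLoop f_size 1048576 [0, 1, 2, 3, 4, 5, 6] 0).toNat := rfl

theorem gws_alt_eval (f_size : Int) : get_work_size_alt f_size =
    if f_size ≤ 1048576 then -1
    else 524288 * (2:Int) ^
      (min 6 (max 0 (PySem.Int.floordiv ((PySem.Int.bitLength (f_size - 1) : Int) - 21) 3))).toNat := rfl

-- both sides agree in bucket k, k ≤ 3 (the buckets covering all of Dom above 2^20)
theorem bucket_eq (f_size : Int) (k : Nat) (hk : k ≤ 3) (hlo : (2:Int) ^ (20 + 3 * k) < f_size)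
    (hhi : f_size ≤ (2:Int) ^ (23 + 3 * k)) :
    get_work_size f_size = get_work_size_alt f_size := by
  have hB := alt_bucket f_size k hlo hhi
  rw [gws_eval, gws_alt_eval, hB]
  interval_cases k <;>
  · norm_num at hlo hhi
    rw [if_neg (by omega), if_neg (by omega)]
    norm_num [gwsLoop]
    split_ifs <;> simp_all <;> omega

-- ===== VERDICT (by name: the statement is the Claim_ definition above) =====
theorem get_work_size_spec : Claim_equal_get_work_size := by
  intro f_size hdom
  unfold Spec_get_work_size
  have hd : f_size <= 2147483648 := by
    simp only [Dom_get_work_size, pvDomInt, decide_eq_true_eq] at hdom; omega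
  by_cases h0 : f_size ≤ 1048576
  · rw [gws_eval, gws_alt_eval, if_pos h0, if_pos h0]
  · by_cases h1 : f_size ≤ 8388608
    · exact bucket_eq f_size 0 (by norm_num) (by norm_num; omega) (by norm_num; omega)
    by_cases h2 : f_size ≤ 67108864
    · exact bucket_eq f_size 1 (by norm_num) (by norm_num; omega) (by norm_num; omega)
    by_cases h3 : f_size ≤ 536870912
    · exact bucket_eq f_size 2 (by norm_num) (by norm_num; omega) (by norm_num; omega)
    · exact bucket_eq f_size 3 (by norm_num) (by norm_num; omega) (by norm_num; omega)
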